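-- pv_equiv track=rewrite | github.com/VittorioPisapia/NQueens-Problem-Astar-CSP | nqueens_problem.py | count_legal_in_row
-- ===== SOURCE A (Python) =====
-- from typing import Tuple, Iterable, Any
--
-- State = Tuple[int,...] #Tuple of arbitrary lenghts where all elements are int: A state is a tuple of column indices, one per row already filled. state = (1,3,5) means in row 0 there is a queen in column 1 etc. len(state) gives how many rows are already filled
--
-- def count_legal_in_row(state: State, n: int, r: int) -> int:
--     count = 0
--     for c in range(n):
--         ok = True
--         for rp, cp in enumerate(state):
--             if cp == c:
--                 ok = False
--                 break
--             if abs(cp - c) == abs(rp - r):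
--                 ok = False
--                 break
--         if ok:
--             count += 1
--     return count
-- ===== SOURCE B (Python) =====
-- def count_legal_in_row(state, n, r):
--     cols = set(state)
--     diag = {cp - rp for rp, cp in enumerate(state)}
--     anti = {cp + rp for rp, cp in enumerate(state)}
--     return sum(1 for c in range(n)
--                if c not in cols and (c - r) not in diag and (c + r) not in anti)
-- ===== Notes on version B (the rewrite author's own statement) =====
-- stated objective: faster
-- what changed: B precomputes column/diagonal/anti-diagonal sets in one enumeration of state and then counts columns with O(1) lookups, instead of rescanning all placed queens for every column.
import Mathlib
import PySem

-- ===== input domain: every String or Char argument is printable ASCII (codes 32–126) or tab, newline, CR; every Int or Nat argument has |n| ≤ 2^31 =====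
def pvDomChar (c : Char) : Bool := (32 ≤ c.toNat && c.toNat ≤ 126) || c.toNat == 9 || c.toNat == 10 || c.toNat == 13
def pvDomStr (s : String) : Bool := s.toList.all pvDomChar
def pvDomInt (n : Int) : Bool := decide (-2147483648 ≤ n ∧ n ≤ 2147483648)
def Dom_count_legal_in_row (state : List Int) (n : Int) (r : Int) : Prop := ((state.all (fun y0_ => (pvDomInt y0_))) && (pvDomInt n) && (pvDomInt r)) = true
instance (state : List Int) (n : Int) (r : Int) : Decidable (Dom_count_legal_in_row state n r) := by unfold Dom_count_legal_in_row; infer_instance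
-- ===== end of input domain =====

-- B replaces A's per-column rescan of all placed queens by column/diagonal/anti-diagonal
-- sets built once, then a single counting pass over the columns.

-- ===== PORT A =====
-- inner 'for rp, cp in enumerate(state)' loop with its two break conditions
def pvOkA : List (Int × Int) → Int → Int → Bool
  | [], _, _ => true
  | (rp, cp) :: rest, r, c =>
    if cp == c then false
    else if (cp - c).natAbs == (rp - r).natAbs then false
    else pvOkA rest r c

def count_legal_in_row (state : List Int) (n : Int) (r : Int) : Int :=
  (PySem.List.pyRange 0 n 1).foldl
    (fun count c => if pvOkA (PySem.List.enumerate state 0) r c then count + 1 else count) 0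

-- ===== PORT B =====
def count_legal_in_row_alt (state : List Int) (n : Int) (r : Int) : Int :=
  let cols : PySem.Set Int := PySem.Set.ofList state
  let diag : PySem.Set Int := PySem.Set.ofList ((PySem.List.enumerate state 0).map (fun p => p.2 - p.1))
  let anti : PySem.Set Int := PySem.Set.ofList ((PySem.List.enumerate state 0).map (fun p => p.2 + p.1))
  ((PySem.List.pyRange 0 n 1).countP
    (fun c => !cols.contains c && !diag.contains (c - r) && !anti.contains (c + r)) : Int)

-- ===== PRECONDITION & SPEC =====
def Spec_count_legal_in_row (state : List Int) (n : Int) (r : Int) (out : Int) : Prop := out = count_legal_in_row_alt state n r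
instance (state : List Int) (n : Int) (r : Int) (out : Int) : Decidable (Spec_count_legal_in_row state n r out) := by unfold Spec_count_legal_in_row; infer_instance

-- ===== CLAIM (what is proved, stated in full; the proofs are below) =====
def Claim_equal_count_legal_in_row : Prop := ∀ (state : List Int) (n : Int) (r : Int), Dom_count_legal_in_row state n r → Spec_count_legal_in_row state n r (count_legal_in_row state n r)

-- ===== LEMMAS AND PROOFS =====

-- A's break-loop returns true iff no enumerated queen hits column c or a shared diagonal.
theorem pvOkA_iff (l : List (Int × Int)) (r c : Int) :
    pvOkA l r c = true ↔ ∀ p ∈ l, p.2 ≠ c ∧ (p.2 - c).natAbs ≠ (p.1 - r).natAbs := by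
  induction l with
  | nil => simp [pvOkA]
  | cons p rest ih =>
    obtain ⟨rp, cp⟩ := p
    by_cases h1 : cp = c
    · simp [pvOkA, h1]
    · by_cases h2 : (cp - c).natAbs = (rp - r).natAbs
      · simp [pvOkA, h1, h2]
      · simp [pvOkA, h1, h2, ih]

-- pointwise: A's legality test for column c equals B's three set lookups
theorem pvOk_eq_cond (state : List Int) (r c : Int) :
    pvOkA (PySem.List.enumerate state 0) r c =
      (!(PySem.Set.ofList state).contains c &&
       !(PySem.Set.ofList ((PySem.List.enumerate state 0).map (fun p => p.2 - p.1))).contains (c - r) &&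
       !(PySem.Set.ofList ((PySem.List.enumerate state 0).map (fun p => p.2 + p.1))).contains (c + r)) := by
  rw [Bool.eq_iff_iff, pvOkA_iff]
  simp only [Bool.and_eq_true, Bool.not_eq_true', PySem.Set.contains, List.contains_eq_mem,
    decide_eq_false_iff_not, PySem.Set.mem_ofList, List.mem_map, not_exists, not_and]
  constructor
  · intro h
    refine ⟨⟨fun hc => ?_, fun p hp hd => ?_⟩, fun p hp ha => ?_⟩
    · have : c ∈ (PySem.List.enumerate state 0).map Prod.snd := by
        rw [PySem.List.map_snd_enumerate]; exact hc
      rcases List.mem_map.mp this with ⟨p, hp, hpc⟩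
      exact (h p hp).1 hpc
    · exact (h p hp).2 (by omega)
    · exact (h p hp).2 (by omega)
  · intro ⟨⟨hc, hd⟩, ha⟩ p hp
    refine ⟨fun he => hc ?_, fun he => ?_⟩
    · have hm : p.2 ∈ (PySem.List.enumerate state 0).map Prod.snd := List.mem_map_of_mem hp
      rw [PySem.List.map_snd_enumerate] at hm
      rwa [he] at hm
    · rcases Int.natAbs_eq_natAbs_iff.mp he with h' | h'
      · exact hd p hp (by omega)
      · exact ha p hp (by omega)

-- ===== VERDICT (by name: the statement is the Claim_ definition above) =====
theorem count_legal_in_row_spec : Claim_equal_count_legal_in_row := by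
  intro state n r _
  unfold Spec_count_legal_in_row count_legal_in_row count_legal_in_row_alt
  rw [PySem.List.foldl_count_if]
  rw [List.countP_congr (fun c _ => by rw [pvOk_eq_cond state r c])]
  simp
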